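-- pv_equiv track=rewrite | github.com/iAmSomething/2026- | scripts/sync_elections_master.py | _build_sample_checks
-- ===== SOURCE A (Python) =====
-- from typing import Any
--
-- def _build_sample_checks(slots: list[dict[str, Any]]) -> dict[str, Any]:
--     by_region: dict[str, list[dict[str, Any]]] = {}
--     for slot in slots:
--         by_region.setdefault(slot["region_code"], []).append(slot)
--
--     return {
--         "region_32_000_slot_count": len(by_region.get("32-000", [])),
--         "region_42_000_slot_count": len(by_region.get("42-000", [])),
--         "region_26_710_slot_count": len(by_region.get("26-710", [])),
--     }
-- ===== SOURCE B (Python) =====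
-- def _build_sample_checks(slots: list) -> dict:
--     def count(code: str) -> int:
--         n = 0
--         for s in slots:
--             if s["region_code"] == code:
--                 n += 1
--         return n
--
--     return {
--         "region_32_000_slot_count": count("32-000"),
--         "region_42_000_slot_count": count("42-000"),
--         "region_26_710_slot_count": count("26-710"),
--     }
-- ===== Notes on version B (the rewrite author's own statement) =====
-- stated objective: simpler
-- what changed: Drops the grouped-by-region dict of slot lists entirely; a local helper scans slots counting matches for each of the three region codes directly.
import Mathlib
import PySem

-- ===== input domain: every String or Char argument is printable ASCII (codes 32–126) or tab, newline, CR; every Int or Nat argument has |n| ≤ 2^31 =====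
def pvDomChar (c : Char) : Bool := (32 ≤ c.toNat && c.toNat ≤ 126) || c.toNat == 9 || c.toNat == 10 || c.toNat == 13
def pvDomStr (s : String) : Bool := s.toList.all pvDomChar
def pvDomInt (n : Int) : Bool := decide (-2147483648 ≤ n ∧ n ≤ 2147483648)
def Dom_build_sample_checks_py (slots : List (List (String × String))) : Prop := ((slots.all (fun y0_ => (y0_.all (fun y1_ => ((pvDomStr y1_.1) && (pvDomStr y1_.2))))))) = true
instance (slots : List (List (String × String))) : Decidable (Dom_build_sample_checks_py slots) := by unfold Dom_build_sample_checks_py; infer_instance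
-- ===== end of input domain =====

-- B differs from A only in structure: A groups all slots by region_code into a dict of
-- lists and reads three lengths; B scans slots once per code, counting matches directly.

-- slot["region_code"] (total form; Pre_ guarantees the key is present, so the default is never the result)
def pvRegionCode (s : List (String × String)) : String :=
  (PySem.Dict.ofList s).getD "region_code" ""

-- ===== PORT A =====
def build_sample_checks_py (slots : List (List (String × String))) : List (String × Int) :=
  let by_region : PySem.Dict String (List (List (String × String))) :=
    slots.foldl (fun d s => d.modify (pvRegionCode s) [] (· ++ [s])) PySem.Dict.empty
  [ ("region_32_000_slot_count", ((by_region.getD "32-000" []).length : Int)),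
    ("region_42_000_slot_count", ((by_region.getD "42-000" []).length : Int)),
    ("region_26_710_slot_count", ((by_region.getD "26-710" []).length : Int)) ]

-- ===== PORT B =====
def pvCount (slots : List (List (String × String))) (code : String) : Int :=
  slots.foldl (fun n s => if pvRegionCode s == code then n + 1 else n) 0

def build_sample_checks_py_alt (slots : List (List (String × String))) : List (String × Int) :=
  [ ("region_32_000_slot_count", pvCount slots "32-000"),
    ("region_42_000_slot_count", pvCount slots "42-000"),
    ("region_26_710_slot_count", pvCount slots "26-710") ]

-- ===== PRECONDITION & SPEC =====
-- Pre_ excludes exactly the slots lacking a "region_code" key, on which Python A raises KeyError.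
def Pre_build_sample_checks_py (slots : List (List (String × String))) : Prop :=
  (slots.all (fun s => s.any (fun p => p.1 == "region_code"))) = true
instance (slots : List (List (String × String))) : Decidable (Pre_build_sample_checks_py slots) := by unfold Pre_build_sample_checks_py; infer_instance

def pvWitness_build_sample_checks_py : (List (List (String × String))) :=
  [[("region_code", "32-000")], [("region_code", "99-000"), ("name", "x")]]

def Spec_build_sample_checks_py (slots : List (List (String × String))) (out : List (String × Int)) : Prop := out = build_sample_checks_py_alt slots
instance (slots : List (List (String × String))) (out : List (String × Int)) : Decidable (Spec_build_sample_checks_py slots out) := by unfold Spec_build_sample_checks_py; infer_instance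

-- ===== CLAIM (what is proved, stated in full; the proofs are below) =====
def Claim_equal_build_sample_checks_py : Prop := ∀ (slots : List (List (String × String))), Dom_build_sample_checks_py slots → Pre_build_sample_checks_py slots → Spec_build_sample_checks_py slots (build_sample_checks_py slots)

-- ===== LEMMAS AND PROOFS =====

theorem pv_count_shift (code : String) (t : List (List (String × String))) :
    ∀ (m : Int), t.foldl (fun n s => if pvRegionCode s == code then n + 1 else n) m
      = m + t.foldl (fun n s => if pvRegionCode s == code then n + 1 else n) 0 := by
  induction t with
  | nil => intro m; simp [List.foldl]
  | cons a b ihb =>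
    intro m
    simp only [List.foldl]
    rw [ihb, ihb (if pvRegionCode a == code then (0:Int) + 1 else 0)]
    split <;> ring

-- length of one bucket of A's grouping loop = count of matching slots
theorem pv_bucket_len (l : List (List (String × String)))
    (d : PySem.Dict String (List (List (String × String)))) (code : String) :
    (((l.foldl (fun d s => d.modify (pvRegionCode s) [] (· ++ [s])) d).getD code []).length : Int)
      = ((d.getD code []).length : Int)
        + l.foldl (fun n s => if pvRegionCode s == code then n + 1 else n) 0 := by
  induction l generalizing d with
  | nil => simp [List.foldl]
  | cons s t ih =>
    simp only [List.foldl]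
    rw [ih]
    rw [pv_count_shift code t (if pvRegionCode s == code then (0:Int) + 1 else 0)]
    rw [PySem.Dict.getD_modify]
    by_cases h : code = pvRegionCode s
    · subst h
      simp [List.length_append]
      push_cast
      ring
    · have hb : (pvRegionCode s == code) = false := by
        simp [beq_iff_eq]; exact fun he => h he.symm
      simp [h, hb]

theorem build_sample_checks_py_spec : Claim_equal_build_sample_checks_py := by
  intro slots _ _
  unfold Spec_build_sample_checks_py build_sample_checks_py build_sample_checks_py_alt pvCount
  simp only [pv_bucket_len slots PySem.Dict.empty]
  simp [PySem.Dict.getD_empty]
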